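-- pv_equiv track=rewrite | github.com/KostiantynMoskalenko/First_repo | Module5_Lesson6/HomeWork6.py | is_spam_words
-- ===== SOURCE A (Python) =====
-- def is_spam_words(text, spam_words, space_around=False):
--     text = str.lower(text)
--     spam_words_lowcase = []
--     for word in spam_words:
--         spam_words_lowcase.append(word)
--         for word in spam_words_lowcase:
--             if space_around:
--                 word_spaces = (" " + word + " ")
--                 word_space_dot = (" " + word + ".")
--                 word_rspace = (word + " ")
--                 word_rdot = (word + ".")
--                 if text.find(word_spaces) != -1 or text.find(word_space_dot) != -1:
--                     return (True)
--                 if text.startswith(word_rspace) or text.startswith(word_rdot):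
--                     return(True)
--
--             else:
--                 if text.find(word) != -1:
--                     return (True)
--
--     return(False)
-- ===== SOURCE B (Python) =====
-- def is_spam_words(text, spam_words, space_around=False):
--     t = text.lower()
--
--     def hit(w):
--         if space_around:
--             return (" " + w + " ") in t or (" " + w + ".") in t \
--                 or t.startswith(w + " ") or t.startswith(w + ".")
--         return w in t
--
--     return any(hit(w) for w in spam_words)
-- ===== Notes on version B (the rewrite author's own statement) =====
-- stated objective: simpler
-- what changed: A's quadratic nested loop (appending each word to a list and re-scanning the whole accumulated list with early returns) is replaced by a single any() pass applying one per-word predicate.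
import Mathlib
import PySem

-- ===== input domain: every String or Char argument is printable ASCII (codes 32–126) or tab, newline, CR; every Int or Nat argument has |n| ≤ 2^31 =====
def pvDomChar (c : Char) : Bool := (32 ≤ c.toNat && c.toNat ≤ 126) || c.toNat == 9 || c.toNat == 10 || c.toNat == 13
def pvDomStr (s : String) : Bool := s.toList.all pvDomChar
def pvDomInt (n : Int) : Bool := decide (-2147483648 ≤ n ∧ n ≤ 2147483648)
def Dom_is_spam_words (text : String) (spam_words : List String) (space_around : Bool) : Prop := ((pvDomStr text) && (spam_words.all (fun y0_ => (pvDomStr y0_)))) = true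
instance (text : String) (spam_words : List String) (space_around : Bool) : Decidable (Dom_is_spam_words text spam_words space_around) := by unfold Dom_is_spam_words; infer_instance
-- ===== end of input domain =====

-- B replaces A's quadratic nested loop (re-scanning an accumulated copy of the word list)
-- by a single any() pass with one predicate per word: objective 'simpler'.

-- ===== PORT A =====
-- inner 'for word in spam_words_lowcase' loop with its early returns
def pvInnerA (t : List Char) (space_around : Bool) : List (List Char) → Bool
  | [] => false
  | w :: ws =>
    if space_around then
      let word_spaces := (' ' :: w) ++ [' ']
      let word_space_dot := (' ' :: w) ++ ['.']
      let word_rspace := w ++ [' ']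
      let word_rdot := w ++ ['.']
      if PySem.Chars.find t word_spaces ≠ -1 ∨ PySem.Chars.find t word_space_dot ≠ -1 then true
      else if PySem.Chars.startswith t word_rspace || PySem.Chars.startswith t word_rdot then true
      else pvInnerA t space_around ws
    else
      if PySem.Chars.find t w ≠ -1 then true
      else pvInnerA t space_around ws

-- outer loop: append the word, then run the inner loop over the accumulated list
def pvOuterA (t : List Char) (space_around : Bool) (acc : List (List Char)) : List (List Char) → Bool
  | [] => false
  | w :: ws =>
    let acc' := acc ++ [w]
    if pvInnerA t space_around acc' then true
    else pvOuterA t space_around acc' ws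

def is_spam_words (text : String) (spam_words : List String) (space_around : Bool) : Bool :=
  pvOuterA (PySem.Chars.lower text.toList) space_around [] (spam_words.map String.toList)

-- ===== PORT B =====
def pvHitB (t : List Char) (space_around : Bool) (w : List Char) : Bool :=
  if space_around then
    PySem.Chars.isIn ((' ' :: w) ++ [' ']) t || PySem.Chars.isIn ((' ' :: w) ++ ['.']) t ||
    PySem.Chars.startswith t (w ++ [' ']) || PySem.Chars.startswith t (w ++ ['.'])
  else
    PySem.Chars.isIn w t

def is_spam_words_alt (text : String) (spam_words : List String) (space_around : Bool) : Bool :=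
  (spam_words.map String.toList).any (pvHitB (PySem.Chars.lower text.toList) space_around)

-- ===== PRECONDITION & SPEC =====
def Spec_is_spam_words (text : String) (spam_words : List String) (space_around : Bool) (out : Bool) : Prop := out = is_spam_words_alt text spam_words space_around
instance (text : String) (spam_words : List String) (space_around : Bool) (out : Bool) : Decidable (Spec_is_spam_words text spam_words space_around out) := by unfold Spec_is_spam_words; infer_instance

-- ===== CLAIM (what is proved, stated in full; the proofs are below) =====
def Claim_equal_is_spam_words : Prop := ∀ (text : String) (spam_words : List String) (space_around : Bool), Dom_is_spam_words text spam_words space_around → Spec_is_spam_words text spam_words space_around (is_spam_words text spam_words space_around)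

-- ===== LEMMAS AND PROOFS =====

-- 'find ≠ -1' as a Bool is exactly 'in'
theorem pv_findb (t w : List Char) :
    (!decide (PySem.Chars.find t w = -1)) = PySem.Chars.isIn w t := by
  cases h : PySem.Chars.isIn w t
  · simp [(PySem.Chars.find_eq_neg_one_iff t w).mpr ((PySem.Chars.isIn_eq_false_iff w t).mp h)]
  · have hne := (PySem.Chars.find_ne_neg_one_iff t w).mpr ((PySem.Chars.isIn_iff_infix w t).mp h)
    simp [hne]

-- A's inner-loop step tests exactly B's per-word predicate
theorem pvInner_eq_any (t : List Char) (sa : Bool) (l : List (List Char)) :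
    pvInnerA t sa l = l.any (pvHitB t sa) := by
  induction l with
  | nil => simp [pvInnerA]
  | cons w ws ih =>
    cases sa <;>
      simp [pvInnerA, pvHitB, List.any_cons, ih, pv_findb, Bool.or_assoc]

-- the outer loop over a nonempty remainder is 'any' over accumulated ++ remainder
theorem pvOuter_eq (t : List Char) (sa : Bool) (l acc : List (List Char)) :
    pvOuterA t sa acc l = (!l.isEmpty && (acc ++ l).any (pvHitB t sa)) := by
  induction l generalizing acc with
  | nil => simp [pvOuterA]
  | cons w ws ih =>
    simp only [pvOuterA, pvInner_eq_any, ih (acc ++ [w])]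
    cases h : (acc ++ [w]).any (pvHitB t sa)
    · cases ws <;> simp_all
    · cases ws with
      | nil => simp_all
      | cons x xs =>
        simp only [if_true, List.isEmpty_cons, Bool.not_false, Bool.true_and]
        have : (acc ++ w :: x :: xs).any (pvHitB t sa) = true := by
          rcases List.any_eq_true.mp h with ⟨y, hy, hpy⟩
          exact List.any_eq_true.mpr ⟨y, by
            rcases List.mem_append.mp hy with h' | h'
            · exact List.mem_append.mpr (Or.inl h')
            · simp at h'; simp [h'], hpy⟩
        simp [this]

-- ===== VERDICT (by name: the statement is the Claim_ definition above) =====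
theorem is_spam_words_spec : Claim_equal_is_spam_words := by
  intro text spam_words space_around _
  unfold Spec_is_spam_words is_spam_words is_spam_words_alt
  rw [pvOuter_eq]
  cases h : spam_words.map String.toList <;> simp [h]
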